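-- pv_equiv track=rewrite | github.com/matz2532/SAM_division_prediction | Code/Propagation/InversedTissuePropagation.py | mapp
-- ===== SOURCE A (Python) =====
-- def mapp(cellsToTrack, mappedCells):
--     trackedCells = {}
--     for c in cellsToTrack:
--         for divCells, mappedNeighbors in mappedCells.items():
--             if c in mappedNeighbors:
--                 if c in trackedCells:
--                     assert trackedCells[c] == mappedNeighbors[c], "The cell {} was mapped to two different daughter cells. {} != {}".format(c, trackedCells[c], mappedNeighbors[c])
--                 trackedCells[c] = mappedNeighbors[c]
--     return trackedCells
-- ===== SOURCE B (Python) =====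
-- def mapp(cellsToTrack, mappedCells):
--     index = {}
--     for mappedNeighbors in mappedCells.values():
--         index.update(mappedNeighbors)
--     return {c: index[c] for c in cellsToTrack if c in index}
-- ===== Notes on version B (the rewrite author's own statement) =====
-- stated objective: faster
-- what changed: Instead of rescanning every neighbor dict once per tracked cell, B merges all neighbor dicts into one index dict in a single pass and then does one lookup per tracked cell.
import Mathlib
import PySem

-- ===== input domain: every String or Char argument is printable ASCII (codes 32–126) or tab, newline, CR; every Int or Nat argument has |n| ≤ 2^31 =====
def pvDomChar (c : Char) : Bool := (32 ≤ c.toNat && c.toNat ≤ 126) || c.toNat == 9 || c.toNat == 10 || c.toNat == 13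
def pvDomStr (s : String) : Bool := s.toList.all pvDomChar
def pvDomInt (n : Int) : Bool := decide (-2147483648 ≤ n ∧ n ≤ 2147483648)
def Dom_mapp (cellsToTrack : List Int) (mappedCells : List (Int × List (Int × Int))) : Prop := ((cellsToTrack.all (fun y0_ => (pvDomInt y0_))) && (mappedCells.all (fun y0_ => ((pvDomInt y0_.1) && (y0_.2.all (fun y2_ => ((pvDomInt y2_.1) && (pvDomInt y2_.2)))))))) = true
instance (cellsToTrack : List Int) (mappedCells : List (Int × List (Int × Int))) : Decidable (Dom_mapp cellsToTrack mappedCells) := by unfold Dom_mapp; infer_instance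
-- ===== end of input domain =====

-- B replaces the per-tracked-cell rescan of all neighbor dicts by a single precomputed
-- merged index dict, then one lookup per tracked cell (objective: faster).

-- ===== PORT A =====
-- trackedCells is a Python dict → PySem.Dict; the assert never fires on inputs admitted by
-- Pre_mapp below, so the port performs the assignment unconditionally.
def mapp (cellsToTrack : List Int) (mappedCells : List (Int × List (Int × Int))) : List (Int × Int) :=
  (cellsToTrack.foldl
    (fun (trackedCells : PySem.Dict Int Int) c =>
      mappedCells.foldl
        (fun trackedCells kv =>
          match kv.2.lookup c with            -- 'if c in mappedNeighbors: … mappedNeighbors[c]'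
          | some v => trackedCells.insert c v
          | none   => trackedCells)
        trackedCells)
    PySem.Dict.empty).items

-- ===== PORT B =====
def mergeIndex (mappedCells : List (Int × List (Int × Int))) : PySem.Dict Int Int :=
  mappedCells.foldl (fun ix kv => ix.update kv.2) PySem.Dict.empty

def mapp_alt (cellsToTrack : List Int) (mappedCells : List (Int × List (Int × Int))) : List (Int × Int) :=
  let index : PySem.Dict Int Int := mergeIndex mappedCells
  (cellsToTrack.foldl
    (fun (out : PySem.Dict Int Int) c =>
      match index.get? c with                 -- '{c: index[c] for c in cellsToTrack if c in index}'
      | some v => out.insert c v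
      | none   => out)
    PySem.Dict.empty).items

-- ===== PRECONDITION & SPEC =====
-- Pre_ excludes exactly the inputs on which A's assert fires (a tracked cell mapped to two
-- different daughter values): there the Python A raises AssertionError and returns nothing.
-- (On association lists whose duplicate keys carry conflicting values — lists that do not
-- represent any Python dict — Pre_ also fails; such inputs are unreachable from Python.)
def Pre_mapp (cellsToTrack : List Int) (mappedCells : List (Int × List (Int × Int))) : Prop :=
  ∀ c ∈ cellsToTrack, ∀ p ∈ mappedCells.flatMap (fun kv => kv.2),
    ∀ q ∈ mappedCells.flatMap (fun kv => kv.2), p.1 = c → q.1 = c → p.2 = q.2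
instance (cellsToTrack : List Int) (mappedCells : List (Int × List (Int × Int))) : Decidable (Pre_mapp cellsToTrack mappedCells) := by unfold Pre_mapp; infer_instance
def pvWitness_mapp : List Int × (List (Int × List (Int × Int))) := ([1, 2], [(10, [(1, 5)]), (11, [(2, 7), (3, 8)])])

def Spec_mapp (cellsToTrack : List Int) (mappedCells : List (Int × List (Int × Int))) (out : List (Int × Int)) : Prop := out = mapp_alt cellsToTrack mappedCells
instance (cellsToTrack : List Int) (mappedCells : List (Int × List (Int × Int))) (out : List (Int × Int)) : Decidable (Spec_mapp cellsToTrack mappedCells out) := by unfold Spec_mapp; infer_instance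

-- ===== CLAIM (what is proved, stated in full; the proofs are below) =====
def Claim_equal_mapp : Prop := ∀ (cellsToTrack : List Int) (mappedCells : List (Int × List (Int × Int))), Dom_mapp cellsToTrack mappedCells → Pre_mapp cellsToTrack mappedCells → Spec_mapp cellsToTrack mappedCells (mapp cellsToTrack mappedCells)

-- ===== LEMMAS AND PROOFS =====

-- a fold that keeps the last 'some' produced by g, seeded by a
theorem foldl_or_override {α β : Type} (g : β → Option α) (l : List β) :
    ∀ (a : Option α),
      l.foldl (fun acc x => (g x).or acc) a
        = (l.foldl (fun acc x => (g x).or acc) none).or a := by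
  induction l with
  | nil => intro a; simp
  | cons x xs ih =>
    intro a
    simp only [List.foldl_cons]
    rw [ih ((g x).or a), ih ((g x).or none)]
    simp [Option.or_assoc]

-- value of the LAST pair with key c (what repeated dict insertion keeps)
def lastVal (ps : List (Int × Int)) (c : Int) : Option Int :=
  ps.foldl (fun acc p => (if p.1 = c then some p.2 else none).or acc) none

theorem lastVal_cons (p : Int × Int) (ps : List (Int × Int)) (c : Int) :
    lastVal (p :: ps) c = (lastVal ps c).or (if p.1 = c then some p.2 else none) := by
  show ps.foldl _ ((if p.1 = c then some p.2 else none).or none) = _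
  rw [foldl_or_override (fun p : Int × Int => if p.1 = c then some p.2 else none) ps]
  simp [lastVal]

theorem lastVal_mem {ps : List (Int × Int)} {c v : Int} (h : lastVal ps c = some v) :
    (c, v) ∈ ps := by
  induction ps with
  | nil => simp [lastVal] at h
  | cons p ps ih =>
    rw [lastVal_cons] at h
    cases hps : lastVal ps c with
    | some w =>
      rw [hps] at h
      simp only [Option.some_or, Option.some.injEq] at h
      subst h
      exact List.mem_cons_of_mem _ (ih hps)
    | none =>
      rw [hps] at h
      simp only [Option.none_or] at h
      by_cases hp : p.1 = c
      · rw [if_pos hp] at h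
        cases h
        have hpp : (c, p.2) = p := by rw [← hp]
        rw [hpp]
        exact List.mem_cons_self
      · rw [if_neg hp] at h; simp at h

theorem lastVal_none_iff (ps : List (Int × Int)) (c : Int) :
    lastVal ps c = none ↔ ∀ p ∈ ps, p.1 ≠ c := by
  induction ps with
  | nil => simp [lastVal]
  | cons p ps ih =>
    rw [lastVal_cons]
    cases hps : lastVal ps c with
    | some w =>
      simp only [Option.some_or]
      constructor
      · intro h; simp at h
      · intro h
        exact absurd rfl (h (c, w) (List.mem_cons_of_mem _ (lastVal_mem hps)))
    | none =>
      simp only [Option.none_or]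
      by_cases hp : p.1 = c
      · rw [if_pos hp]
        constructor
        · intro h; simp at h
        · intro h; exact absurd hp (h p List.mem_cons_self)
      · rw [if_neg hp]
        constructor
        · intro _ q hq
          cases hq with
          | head => exact hp
          | tail _ hm => exact ih.mp hps q hm
        · intro _; rfl

-- B's merged index looks up the last value inserted for c
theorem index_get? (mc : List (Int × List (Int × Int))) (c : Int) :
    ∀ ix : PySem.Dict Int Int,
      (mc.foldl (fun ix kv => ix.update kv.2) ix).get? c
        = (lastVal (mc.flatMap (fun kv => kv.2)) c).or (ix.get? c) := by
  induction mc with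
  | nil => intro ix; simp [lastVal]
  | cons kv mc ih =>
    intro ix
    have hup : ∀ (ps : List (Int × Int)) (d : PySem.Dict Int Int),
        (d.update ps).get? c = (lastVal ps c).or (d.get? c) := by
      intro ps
      induction ps with
      | nil => intro d; simp only [lastVal, List.foldl_nil, Option.none_or]; rfl
      | cons p ps ihp =>
        intro d
        show ((d.insert p.1 p.2).update ps).get? c = _
        rw [ihp, lastVal_cons]
        cases lastVal ps c with
        | some w => simp
        | none =>
          simp only [Option.none_or]
          by_cases hp : p.1 = c
          · subst hp; simp [PySem.Dict.get?_insert_self]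

          · rw [if_neg hp, PySem.Dict.get?_insert]
            rw [if_neg (fun hh => hp hh.symm)]
            rfl
    have happ : lastVal (kv.2 ++ mc.flatMap (fun kv => kv.2)) c
        = (lastVal (mc.flatMap (fun kv => kv.2)) c).or (lastVal kv.2 c) := by
      have h2 : lastVal (kv.2 ++ mc.flatMap (fun kv => kv.2)) c
          = (mc.flatMap (fun kv => kv.2)).foldl
              (fun acc p => (if p.1 = c then some p.2 else none).or acc) (lastVal kv.2 c) := by
        simp only [lastVal, List.foldl_append]
      rw [h2, foldl_or_override (fun p : Int × Int => if p.1 = c then some p.2 else none)]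
      rfl
    simp only [List.foldl_cons, List.flatMap_cons]
    rw [ih, hup kv.2 ix, happ, Option.or_assoc]

-- first-match value within the LAST item containing c (what A's rescan keeps)
def firstLast (mc : List (Int × List (Int × Int))) (c : Int) : Option Int :=
  mc.foldl (fun acc kv => (kv.2.lookup c).or acc) none

theorem firstLast_cons (kv : Int × List (Int × Int)) (mc : List (Int × List (Int × Int)))
    (c : Int) :
    firstLast (kv :: mc) c = (firstLast mc c).or (kv.2.lookup c) := by
  show mc.foldl _ ((kv.2.lookup c).or none) = _
  rw [foldl_or_override (fun kv : Int × List (Int × Int) => kv.2.lookup c) mc]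
  simp [firstLast]

theorem lookup_mem {c v : Int} : ∀ {ps : List (Int × Int)}, ps.lookup c = some v → (c, v) ∈ ps := by
  intro ps
  induction ps with
  | nil => intro h; simp at h
  | cons p ps ih =>
    obtain ⟨k, w⟩ := p
    intro h
    rw [List.lookup_cons] at h
    cases hck : (c == k) with
    | true =>
      rw [hck] at h
      have hkc : c = k := eq_of_beq hck
      cases h
      rw [hkc]
      exact List.mem_cons_self
    | false =>
      rw [hck] at h
      exact List.mem_cons_of_mem _ (ih h)

theorem lookup_none {c : Int} : ∀ {ps : List (Int × Int)}, ps.lookup c = none →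
    ∀ p ∈ ps, p.1 ≠ c := by
  intro ps
  induction ps with
  | nil => intro _ p hp; cases hp
  | cons p ps ih =>
    obtain ⟨k, w⟩ := p
    intro h q hq
    rw [List.lookup_cons] at h
    cases hck : (c == k) with
    | true => rw [hck] at h; simp at h
    | false =>
      rw [hck] at h
      cases hq with
      | head =>
        intro hc
        rw [show ((k, w) : Int × Int).1 = k from rfl] at hc
        rw [hc] at hck
        simp at hck
      | tail _ hm => exact ih h q hm

theorem firstLast_mem {mc : List (Int × List (Int × Int))} {c v : Int}
    (h : firstLast mc c = some v) : (c, v) ∈ mc.flatMap (fun kv => kv.2) := by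
  induction mc with
  | nil => simp [firstLast] at h
  | cons kv mc ih =>
    rw [firstLast_cons] at h
    simp only [List.flatMap_cons, List.mem_append]
    cases hm : firstLast mc c with
    | some w =>
      rw [hm] at h
      simp only [Option.some_or, Option.some.injEq] at h
      subst h
      exact Or.inr (ih hm)
    | none =>
      rw [hm] at h
      simp only [Option.none_or] at h
      exact Or.inl (lookup_mem h)

theorem firstLast_none_iff (mc : List (Int × List (Int × Int))) (c : Int) :
    firstLast mc c = none ↔ ∀ p ∈ mc.flatMap (fun kv => kv.2), p.1 ≠ c := by
  induction mc with
  | nil => simp [firstLast]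
  | cons kv mc ih =>
    rw [firstLast_cons]
    simp only [List.flatMap_cons, List.mem_append]
    cases hm : firstLast mc c with
    | some w =>
      simp only [Option.some_or]
      constructor
      · intro h; simp at h
      · intro h
        exact absurd rfl (h (c, w) (Or.inr (firstLast_mem hm)))
    | none =>
      simp only [Option.none_or]
      constructor
      · intro h p hp
        cases hp with
        | inl h1 => exact lookup_none h p h1
        | inr h2 => exact ih.mp hm p h2
      · intro h
        cases hl : kv.2.lookup c with
        | none => rfl
        | some w => exact absurd rfl (h (c, w) (Or.inl (lookup_mem hl)))

-- A's inner rescan of all neighbor dicts, as one conditional insertion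
theorem stepA_char (mc : List (Int × List (Int × Int))) (c : Int) :
    ∀ tr : PySem.Dict Int Int,
      mc.foldl (fun tr kv => match kv.2.lookup c with | some v => tr.insert c v | none => tr) tr
        = match firstLast mc c with | some v => tr.insert c v | none => tr := by
  induction mc with
  | nil => intro tr; rfl
  | cons kv mc ih =>
    intro tr
    rw [firstLast_cons]
    simp only [List.foldl_cons]
    cases hl : kv.2.lookup c with
    | none =>
      rw [ih tr]
      cases firstLast mc c <;> rfl
    | some v0 =>
      rw [ih (tr.insert c v0)]
      cases firstLast mc c with
      | none => simp
      | some w => simp [PySem.Dict.insert_insert_self]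

-- ===== VERDICT (by name: the statement is the Claim_ definition above) =====
theorem mapp_spec : Claim_equal_mapp := by
  intro ct mc _ hpre
  unfold Spec_mapp mapp mapp_alt mergeIndex
  have key : ∀ c ∈ ct, ∀ tr : PySem.Dict Int Int,
      mc.foldl (fun tr kv => match kv.2.lookup c with | some v => tr.insert c v | none => tr) tr
        = match (mc.foldl (fun ix kv => ix.update kv.2) PySem.Dict.empty).get? c with
          | some v => tr.insert c v
          | none => tr := by
    intro c hcmem tr
    rw [stepA_char, index_get? mc c PySem.Dict.empty]
    cases hA : firstLast mc c with
    | some vA =>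
      cases hB : lastVal (mc.flatMap (fun kv => kv.2)) c with
      | some vB =>
        have hv : vA = vB :=
          hpre c hcmem _ (firstLast_mem hA) _ (lastVal_mem hB) rfl rfl
        rw [hv]
        simp
      | none =>
        exact absurd rfl ((lastVal_none_iff _ c).mp hB _ (firstLast_mem hA))
    | none =>
      cases hB : lastVal (mc.flatMap (fun kv => kv.2)) c with
      | some vB =>
        exact absurd rfl ((firstLast_none_iff mc c).mp hA _ (lastVal_mem hB))
      | none => simp [PySem.Dict.get?_empty]
  congr 1
  have go : ∀ (l : List Int), (∀ c ∈ l, c ∈ ct) → ∀ tr : PySem.Dict Int Int,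
      l.foldl
        (fun tr c =>
          mc.foldl
            (fun tr kv => match kv.2.lookup c with | some v => tr.insert c v | none => tr) tr)
        tr
      = l.foldl
          (fun out c =>
            match (mc.foldl (fun ix kv => ix.update kv.2) PySem.Dict.empty).get? c with
            | some v => out.insert c v
            | none => out)
          tr := by
    intro l
    induction l with
    | nil => intro _ _; rfl
    | cons c l ihl =>
      intro hsub tr
      simp only [List.foldl_cons]
      rw [key c (hsub c List.mem_cons_self) tr]
      exact ihl (fun d hd => hsub d (List.mem_cons_of_mem _ hd)) _
  exact go ct (fun _ h => h) _
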